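-- pv_equiv track=rewrite | github.com/liuke990205/AviationGraph | Hello/View/searchAllPdf_view.py | bookcut
-- ===== SOURCE A (Python) =====
-- def bookcut(orList):
--     orList.sort()
--     newList = []
--
--     n = 0
--     for k in range(len(orList)):
--         if orList[k][0] == orList[-1][0]:
--             newList.append(orList[n:])
--             break
--         if orList[k][0] != orList[k + 1][0]:
--             subList = orList[n:k + 1]
--             newList.append(subList)
--             n = k + 1
--
--     return newList
-- ===== SOURCE B (Python) =====
-- def bookcut(orList):
--     # Same task, keyed-bucket index instead of boundary scanning with slices.
--     # Sorts orList in place, like the original.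
--     orList.sort()
--     buckets = {}
--     for item in orList:
--         buckets[item[0]] = buckets.get(item[0], []) + [item]
--     return list(buckets.values())
-- ===== Notes on version B (the rewrite author's own statement) =====
-- stated objective: idiomatic
-- what changed: Replaces A's index loop that scans for run boundaries (comparing each item's first element with its neighbour and with the last element) and appends slices, by the idiomatic dict-of-buckets pattern: one pass appending each item to buckets[item[0]], returning the bucket lists, which come out in sorted-key order because the list was sorted first.
import Mathlib
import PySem

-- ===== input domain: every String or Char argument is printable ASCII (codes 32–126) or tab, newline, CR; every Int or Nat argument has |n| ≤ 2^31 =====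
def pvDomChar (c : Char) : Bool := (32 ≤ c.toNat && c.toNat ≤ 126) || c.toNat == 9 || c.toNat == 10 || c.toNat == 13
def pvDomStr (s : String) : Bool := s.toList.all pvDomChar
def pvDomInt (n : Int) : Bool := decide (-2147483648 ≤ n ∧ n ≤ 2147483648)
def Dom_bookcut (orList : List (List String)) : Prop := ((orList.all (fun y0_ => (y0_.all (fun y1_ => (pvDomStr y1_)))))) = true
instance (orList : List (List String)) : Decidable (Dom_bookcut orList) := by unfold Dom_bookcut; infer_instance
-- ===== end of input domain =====

-- B groups the sorted list with a dict of buckets keyed by each item's first element, instead of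
-- A's boundary-scanning index loop with slices (objective: idiomatic; not faster, same O(n log n)).
-- Both A and B sort orList in place; the equivalence proved here is about the return value.

-- ===== PORT A =====
-- item[0] (first element of an inner list; Pre_ guarantees the inner lists are nonempty)
def pyFst (x : List String) : String := PySem.List.pyGetD x 0 ""

-- the 'for k in range(len(orList))' loop of A, with its break and its running group start n
def bookcutLoop (s : List (List String)) (k n : Nat) (acc : List (List (List String))) :
    List (List (List String)) :=
  if _h : k < s.length then
    if pyFst (PySem.List.pyGetD s (k : Int) []) == pyFst (PySem.List.pyGetD s (-1) []) then
      acc ++ [PySem.List.slice s (some (n : Int)) none]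
    else if pyFst (PySem.List.pyGetD s (k : Int) []) != pyFst (PySem.List.pyGetD s ((k : Int) + 1) []) then
      bookcutLoop s (k + 1) (k + 1) (acc ++ [PySem.List.slice s (some (n : Int)) (some ((k : Int) + 1))])
    else
      bookcutLoop s (k + 1) n acc
  else acc
termination_by s.length - k

def bookcut (orList : List (List String)) : List (List (List String)) :=
  let s := PySem.List.sorted orList (fun x => x) false
  bookcutLoop s 0 0 []

-- ===== PORT B =====
def bookcut_alt (orList : List (List String)) : List (List (List String)) :=
  let s := PySem.List.sorted orList (fun x => x) false
  let buckets := s.foldl (fun d item => d.modify (pyFst item) [] (fun g => g ++ [item])) PySem.Dict.empty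
  buckets.values

-- ===== PRECONDITION & SPEC =====
-- Pre_ excludes lists containing an empty inner list: there 'item[0]' raises IndexError in both the
-- Python A and the Python B (unless orList = [], which satisfies Pre_ and on which A returns []).
def Pre_bookcut (orList : List (List String)) : Prop := ∀ x ∈ orList, x ≠ []
instance (orList : List (List String)) : Decidable (Pre_bookcut orList) := by unfold Pre_bookcut; infer_instance

def pvWitness_bookcut : List (List String) := [["b", "1"], ["a"], ["b"], ["a", "z"]]

def Spec_bookcut (orList : List (List String)) (out : List (List (List String))) : Prop := out = bookcut_alt orList
instance (orList : List (List String)) (out : List (List (List String))) : Decidable (Spec_bookcut orList out) := by unfold Spec_bookcut; infer_instance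

-- ===== CLAIM (what is proved, stated in full; the proofs are below) =====
def Claim_equal_bookcut : Prop := ∀ (orList : List (List String)), Dom_bookcut orList → Pre_bookcut orList → Spec_bookcut orList (bookcut orList)

-- ===== LEMMAS AND PROOFS =====

-- the common value both ports compute on the sorted list: for each distinct first element, in
-- first-appearance order, the sublist of items carrying it
def pvGroups (t : List (List String)) : List (List (List String)) :=
  (PySem.Set.ofList (t.map pyFst)).map (fun c => t.filter (fun x => pyFst x == c))

lemma str_nil_le (s : String) : "" ≤ s := by
  rcases lt_trichotomy "" s with h | h | h
  · exact le_of_lt h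
  · exact le_of_eq h
  · rw [String.lt_iff_toList_lt] at h; simp at h

lemma list_le_nil {a : List String} (h : a ≤ []) : a = [] := by
  rcases a with _ | ⟨x, xs⟩
  · rfl
  · exact absurd (List.Lex.nil : ([] : List String) < x :: xs) (not_lt_of_ge h)

lemma pyFst_nil : pyFst [] = "" := rfl

lemma pyFst_cons (x : String) (xs : List String) : pyFst (x :: xs) = x := by
  simp [pyFst, PySem.List.pyGetD_of_nonneg]

-- ≤ on List String (Python's list comparison) is monotone in the first element read by pyFst
lemma pyFst_mono {a b : List String} (h : a ≤ b) : pyFst a ≤ pyFst b := by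
  rcases a with _ | ⟨x, xs⟩
  · exact pyFst_nil ▸ str_nil_le _
  · rcases b with _ | ⟨y, ys⟩
    · exact absurd (list_le_nil h) (by simp)
    · rw [pyFst_cons, pyFst_cons]
      by_contra hxy
      push Not at hxy
      exact absurd h (not_le_of_gt (List.Lex.rel hxy))

-- folding Set.add from a set starting with c, over a list not containing c, keeps c in front
lemma foldl_add_cons {c : String} {l : List String} (s : List String) (hc : c ∉ l) :
    l.foldl PySem.Set.add (c :: s) = c :: l.foldl PySem.Set.add s := by
  induction l generalizing s with
  | nil => rfl
  | cons a l ih =>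
    simp only [List.mem_cons, not_or] at hc
    simp only [List.foldl_cons]
    have hadd : PySem.Set.add (c :: s) a = c :: PySem.Set.add s a := by
      simp [PySem.Set.add, PySem.Set.contains, Ne.symm hc.1]
      split_ifs <;> simp
    rw [hadd, ih _ hc.2]

lemma foldl_add_const {c : String} {l : List String} (hc : ∀ a ∈ l, a = c) :
    l.foldl PySem.Set.add [c] = [c] := by
  induction l with
  | nil => rfl
  | cons a l ih =>
    have ha := hc a (by simp)
    subst ha
    simp only [List.foldl_cons]
    have hstay : PySem.Set.add [a] a = [a] := by simp [PySem.Set.add, PySem.Set.contains]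
    rw [hstay, ih (fun x hx => hc x (by simp [hx]))]

lemma ofList_const_append {c : String} {l₁ l₂ : List String} (h₁ : l₁ ≠ [])
    (hc : ∀ a ∈ l₁, a = c) (h₂ : c ∉ l₂) :
    PySem.Set.ofList (l₁ ++ l₂) = c :: PySem.Set.ofList l₂ := by
  rw [PySem.Set.ofList_eq_foldl, PySem.Set.ofList_eq_foldl, List.foldl_append]
  have h1 : l₁.foldl PySem.Set.add [] = [c] := by
    rcases l₁ with _ | ⟨a, l⟩
    · exact absurd rfl h₁
    · have ha := hc a (by simp)
      subst ha
      have hfirst : PySem.Set.add [] a = [a] := by simp [PySem.Set.add, PySem.Set.contains]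
      simp only [List.foldl_cons, hfirst]
      exact foldl_add_const (fun x hx => hc x (by simp [hx]))
  rw [h1, foldl_add_cons _ h₂]

-- splitting pvGroups at a run boundary: a nonempty constant-key run in front, strictly larger keys behind
lemma pvGroups_split {r u : List (List String)} {c : String} (hr : r ≠ [])
    (hrc : ∀ x ∈ r, pyFst x = c) (hu : ∀ x ∈ u, c < pyFst x) :
    pvGroups (r ++ u) = r :: pvGroups u := by
  unfold pvGroups
  rw [List.map_append]
  rw [ofList_const_append (by simpa using hr) (by simpa using hrc)
    (by simp only [List.mem_map, not_exists]; rintro x ⟨hx, hcx⟩; exact absurd hcx (ne_of_lt (hu x hx)).symm)]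
  rw [List.map_cons]
  congr 1
  · rw [List.filter_append]
    have h1 : r.filter (fun x => pyFst x == c) = r :=
      List.filter_eq_self.mpr (fun x hx => by simp [hrc x hx])
    have h2 : u.filter (fun x => pyFst x == c) = [] :=
      List.filter_eq_nil_iff.mpr (fun x hx => by simp [(ne_of_lt (hu x hx)).symm])
    rw [h1, h2, List.append_nil]
  · apply List.map_congr_left
    intro c' hc'
    rw [PySem.Set.mem_ofList] at hc'
    obtain ⟨x₀, hx₀, rfl⟩ := List.mem_map.mp hc'
    rw [List.filter_append]
    have h1 : r.filter (fun x => pyFst x == pyFst x₀) = [] :=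
      List.filter_eq_nil_iff.mpr (fun x hx => by
        simp only [beq_iff_eq]
        rw [hrc x hx]
        exact (ne_of_lt (hu x₀ hx₀)))
    rw [h1, List.nil_append]

lemma hget (s : List (List String)) (i : Nat) (h : i < s.length) :
    PySem.List.pyGetD s (i : Int) [] = s[i] := by
  rw [PySem.List.pyGetD_natCast, List.getD_eq_getElem?_getD, List.getElem?_eq_getElem h]
  rfl

lemma hgetlast (s : List (List String)) (h : 0 < s.length) :
    PySem.List.pyGetD s (-1) [] = s[s.length - 1] := by
  simp [PySem.List.pyGetD, PySem.List.pyGet?, PySem.List.pyIdx?]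
  rw [if_pos (by omega)]
  simp [List.getElem?_eq_getElem (show s.length - 1 < s.length by omega)]

-- A's loop, entered at index k with group start n and with keys nondecreasing along s,
-- emits exactly the groups of the not-yet-emitted suffix s.drop n
lemma bookcutLoop_eq (s : List (List String))
    (hs : ∀ i j : Nat, ∀ _hi : i < s.length, ∀ _hj : j < s.length, i < j → pyFst s[i] ≤ pyFst s[j]) :
    ∀ d k n acc, s.length - k ≤ d → k < s.length → n ≤ k →
    (∀ i : Nat, ∀ hni : n ≤ i, i ≤ k → ∀ h : i < s.length,
      pyFst (s[i]'h) = pyFst (s[n]'(Nat.lt_of_le_of_lt hni h))) →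
    bookcutLoop s k n acc = acc ++ pvGroups (s.drop n) := by
  intro d
  induction d with
  | zero => intro k n acc hd hk; omega
  | succ d ih =>
    intro k n acc hd hk hnk hrun
    have hle : ∀ i j : Nat, ∀ hij : i ≤ j, ∀ hj : j < s.length,
        pyFst (s[i]'(Nat.lt_of_le_of_lt hij hj)) ≤ pyFst (s[j]'hj) := by
      intro i j hij hj
      rcases Nat.lt_or_ge i j with h | h
      · exact hs i j (by omega) hj h
      · have hej : i = j := by omega
        subst hej; rfl
    have hn : n < s.length := by omega
    rw [bookcutLoop, dif_pos hk, hget s k hk, hgetlast s (by omega)]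
    by_cases h1 : pyFst s[k] = pyFst (s[s.length - 1]'(by omega))
    · rw [if_pos (by simpa using h1)]
      have hconst : ∀ x ∈ s.drop n, pyFst x = pyFst (s[n]'hn) := by
        intro x hx
        obtain ⟨j, hj, rfl⟩ := List.mem_iff_getElem.mp hx
        rw [List.getElem_drop]
        have hjlen : n + j < s.length := by simp at hj; omega
        rcases Nat.lt_or_ge k (n + j) with hc | hc
        swap
        · exact hrun (n + j) (by omega) hc hjlen
        · have e1 : pyFst s[k] ≤ pyFst (s[n+j]'hjlen) := hle k (n+j) (by omega) hjlen
          have e2 : pyFst (s[n+j]'hjlen) ≤ pyFst (s[s.length - 1]'(by omega)) :=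
            hle (n+j) (s.length - 1) (by omega) (by omega)
          rw [← h1] at e2
          have heq : pyFst (s[n+j]'hjlen) = pyFst s[k] := le_antisymm e2 e1
          rw [heq, hrun k hnk le_rfl hk]
      have hsplit : pvGroups (s.drop n) = [s.drop n] := by
        have h0 := pvGroups_split (r := s.drop n) (u := []) (c := pyFst (s[n]'hn))
          (by simp; omega) hconst (by simp)
        simpa [pvGroups] using h0
      rw [PySem.List.slice_from s (by positivity)]
      rw [hsplit]
      simp
    · rw [if_neg (by simpa using h1)]
      have hk1 : k + 1 < s.length := by
        rcases Nat.lt_or_ge (k+1) s.length with h | h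
        · exact h
        · exfalso
          apply h1
          have hek : k = s.length - 1 := by omega
          subst hek
          rfl
      rw [show ((k : Int) + 1) = ((k + 1 : Nat) : Int) by push_cast; ring, hget s (k+1) hk1]
      by_cases h2 : pyFst s[k] = pyFst s[k+1]
      · rw [if_neg (by simpa using h2)]
        exact ih (k+1) n acc (by omega) hk1 (by omega)
          (by
            intro i hni hik hi
            rcases Nat.lt_or_ge k i with hc | hc
            swap
            · exact hrun i hni hc hi
            · have hei : i = k + 1 := by omega
              subst hei
              rw [show pyFst (s[k+1]'hi) = pyFst (s[k+1]'hk1) from rfl, ← h2,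
                hrun k hnk le_rfl hk])
      · rw [if_pos (by simpa using h2)]
        have hrun' : ∀ i : Nat, ∀ hni : k + 1 ≤ i, i ≤ k + 1 → ∀ h : i < s.length,
            pyFst (s[i]'h) = pyFst (s[k+1]'(Nat.lt_of_le_of_lt hni h)) := by
          intro i hni hik hi
          have hei : i = k + 1 := by omega
          subst hei
          rfl
        rw [ih (k+1) (k+1) (acc ++ [PySem.List.slice s (some (n : Int)) (some ((k + 1 : Nat) : Int))])
          (by omega) hk1 le_rfl hrun']
        have hdec : s.drop n = ((s.drop n).take (k + 1 - n)) ++ s.drop (k+1) := by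
          have hdd : List.drop (k+1) s = List.drop (k+1-n) (List.drop n s) := by
            rw [List.drop_drop]; congr 1; omega
          rw [hdd, List.take_append_drop]
        have hr' : ((s.drop n).take (k + 1 - n)) ≠ [] := by
          have hlen : ((s.drop n).take (k + 1 - n)).length = k + 1 - n := by simp; omega
          intro hnil
          rw [hnil] at hlen
          simp at hlen; omega
        have hrc' : ∀ x ∈ ((s.drop n).take (k + 1 - n)), pyFst x = pyFst (s[n]'hn) := by
          intro x hx
          obtain ⟨j, hj, rfl⟩ := List.mem_iff_getElem.mp hx
          have hjlt : j < k + 1 - n := by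
            have hlen : ((s.drop n).take (k + 1 - n)).length = k + 1 - n := by simp; omega
            omega
          rw [List.getElem_take, List.getElem_drop]
          exact hrun (n + j) (by omega) (by omega) (by omega)
        have hu' : ∀ x ∈ s.drop (k+1), pyFst (s[n]'hn) < pyFst x := by
          intro x hx
          obtain ⟨j, hj, rfl⟩ := List.mem_iff_getElem.mp hx
          rw [List.getElem_drop]
          have hjlen : k + 1 + j < s.length := by simp at hj; omega
          have e1 : pyFst s[k] < pyFst s[k+1] := lt_of_le_of_ne (hle k (k+1) (by omega) hk1) h2
          have e2 : pyFst s[k+1] ≤ pyFst (s[k+1+j]'hjlen) := hle (k+1) (k+1+j) (by omega) hjlen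
          calc pyFst (s[n]'hn) = pyFst s[k] := (hrun k hnk le_rfl hk).symm
            _ < pyFst s[k+1] := e1
            _ ≤ pyFst (s[k+1+j]'hjlen) := e2
        have hsp := pvGroups_split hr' hrc' hu'
        rw [← hdec] at hsp
        rw [hsp]
        rw [PySem.List.slice_natCast s n (k+1)]
        simp

lemma bookcut_eq_pvGroups (orList : List (List String)) :
    bookcut orList = pvGroups (PySem.List.sorted orList (fun x => x) false) := by
  unfold bookcut
  set s := PySem.List.sorted orList (fun x => x) false with hs
  rcases Nat.eq_zero_or_pos s.length with h0 | h0
  · rw [bookcutLoop]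
    rw [dif_neg (by omega)]
    have : s = [] := List.eq_nil_of_length_eq_zero h0
    rw [this]
    rfl
  · have hpair : ∀ i j : Nat, ∀ _hi : i < s.length, ∀ _hj : j < s.length, i < j →
        pyFst s[i] ≤ pyFst s[j] := by
      intro i j hi hj hij
      have hp : s.Pairwise (fun a b => a ≤ b) := by
        rw [hs]
        have h := PySem.List.sorted_pairwise (κ := List String) orList (fun x => x)
        have hinst : (LinearOrder.toDecidableLT (α := List String)) =
            (fun (a b : List String) => a.decidableLT b) := Subsingleton.elim _ _
        rw [hinst] at h
        exact h
      exact pyFst_mono (List.pairwise_iff_getElem.mp hp i j hi hj hij)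
    have hrun0 : ∀ i : Nat, ∀ hni : 0 ≤ i, i ≤ 0 → ∀ h : i < s.length,
        pyFst (s[i]'h) = pyFst (s[0]'(Nat.lt_of_le_of_lt hni h)) := by
      intro i hni hik hi
      have hei : i = 0 := by omega
      subst hei
      rfl
    have hres := bookcutLoop_eq s hpair s.length 0 0 [] (by omega) h0 le_rfl hrun0
    simpa using hres

lemma bookcut_alt_eq_pvGroups (orList : List (List String)) :
    bookcut_alt orList = pvGroups (PySem.List.sorted orList (fun x => x) false) := by
  unfold bookcut_alt pvGroups
  set s := PySem.List.sorted orList (fun x => x) false with hs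
  set d := s.foldl (fun d item => d.modify (pyFst item) [] (fun g => g ++ [item])) PySem.Dict.empty with hd
  have hnodup : d.keys.Nodup := by
    rw [hd]
    exact PySem.Dict.nodup_keys_foldl_modify_key s pyFst [] (fun _ item g => g ++ [item]) PySem.Dict.empty (by simp)
  have hkeys : d.keys = PySem.Set.ofList (s.map pyFst) := by
    rw [hd, PySem.Dict.keys_foldl_modify_key s pyFst [] (fun _ item g => g ++ [item]) PySem.Dict.empty]
    simp [PySem.Set.update, PySem.Set.ofList_eq_foldl, PySem.Dict.keys]
    rfl
  have hgetD : ∀ c, d.getD c [] = s.filter (fun x => pyFst x == c) := by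
    intro c
    have hmap : d = (s.map (fun item => (pyFst item, item))).foldl
        (fun d p => d.modify p.1 [] (fun g => g ++ [p.2])) PySem.Dict.empty := by
      rw [hd, List.foldl_map]
    rw [hmap, PySem.Dict.getD_foldl_modify_append]
    simp [List.filter_map, Function.comp_def, List.map_map]
  rw [PySem.Dict.values_eq_map_keys d hnodup [], hkeys]
  exact List.map_congr_left (fun c _ => hgetD c)

-- ===== VERDICT (by name: the statement is the Claim_ definition above) =====
theorem bookcut_spec : Claim_equal_bookcut := by
  intro orList _hdom _hpre
  unfold Spec_bookcut
  rw [bookcut_eq_pvGroups orList, bookcut_alt_eq_pvGroups orList]
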